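-- pv_equiv track=rewrite | github.com/igortejo/Atividades-Universidade | Prog_01/final/sequencia_1_2_3/sequencia_1_2_3.py | tem123plus
-- ===== SOURCE A (Python) =====
-- def tem123plus(l):
--     num_atual = 0
--     resultado = -1
--     index = -1
--     for num in range(len(l)):
--         if l[num] == 1 and index == -1:
--             num_atual = 1
--             index = num
--         if l[num] == 2 and num_atual == 1:
--             num_atual = 2
--         if l[num] == 3 and num_atual == 2:
--             resultado = index
--     return resultado
-- ===== SOURCE B (Python) =====
-- def _find(l, target, start):
--     for k in range(start, len(l)):
--         if l[k] == target:
--             return k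
--     return None
--
-- def tem123plus(l):
--     i = _find(l, 1, 0)
--     if i is None:
--         return -1
--     j = _find(l, 2, i + 1)
--     if j is None:
--         return -1
--     if _find(l, 3, j + 1) is None:
--         return -1
--     return i
-- ===== Notes on version B (the rewrite author's own statement) =====
-- stated objective: simpler
-- what changed: Replaced the interleaved state-machine loop (num_atual/resultado/index flags) by three separate anchored forward searches: first 1, then first 2 after it, then a 3 after that.
import Mathlib
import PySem

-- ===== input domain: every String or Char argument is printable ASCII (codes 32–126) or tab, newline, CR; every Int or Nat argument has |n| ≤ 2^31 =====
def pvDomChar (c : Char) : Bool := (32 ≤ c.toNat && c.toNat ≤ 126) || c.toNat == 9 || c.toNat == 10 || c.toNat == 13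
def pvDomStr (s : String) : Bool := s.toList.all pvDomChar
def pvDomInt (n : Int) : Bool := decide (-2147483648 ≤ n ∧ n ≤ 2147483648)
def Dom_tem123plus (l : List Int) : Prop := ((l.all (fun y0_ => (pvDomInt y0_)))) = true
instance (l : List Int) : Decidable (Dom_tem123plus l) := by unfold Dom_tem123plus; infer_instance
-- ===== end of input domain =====

-- B replaces A's one-pass state machine by three anchored forward searches (simpler decomposition, same O(n) cost).

-- ===== PORT A =====
-- A's loop over range(len(l)) carrying (num_atual, resultado, index); ported as
-- structural recursion over the list with the position counter `pos` as extra state.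
def tem123plusLoop : List Int → Int → Int → Int → Int → Int
  | [], _, _, resultado, _ => resultado
  | x :: xs, pos, numAtual, resultado, index =>
    let p1 : Int × Int := if x = 1 ∧ index = -1 then (1, pos) else (numAtual, index)
    let numAtual := p1.1
    let index := p1.2
    let numAtual := if x = 2 ∧ numAtual = 1 then 2 else numAtual
    let resultado := if x = 3 ∧ numAtual = 2 then index else resultado
    tem123plusLoop xs (pos + 1) numAtual resultado index

def tem123plus (l : List Int) : Int :=
  tem123plusLoop l 0 0 (-1) (-1)

-- ===== PORT B =====
-- port of Source B's _find: scan positions k = base, base+1, … of the suffix `xs = l.drop base`.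
def findFrom : List Int → Int → Nat → Option Nat
  | [], _, _ => none
  | x :: xs, t, base => if x = t then some base else findFrom xs t (base + 1)

def tem123plus_alt (l : List Int) : Int :=
  match findFrom l 1 0 with
  | none => -1
  | some i =>
    match findFrom (l.drop (i + 1)) 2 (i + 1) with
    | none => -1
    | some j =>
      match findFrom (l.drop (j + 1)) 3 (j + 1) with
      | none => -1
      | some _ => (i : Int)

-- ===== PRECONDITION & SPEC =====
def Spec_tem123plus (l : List Int) (out : Int) : Prop := out = tem123plus_alt l
instance (l : List Int) (out : Int) : Decidable (Spec_tem123plus l out) := by unfold Spec_tem123plus; infer_instance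

-- ===== CLAIM (what is proved, stated in full; the proofs are below) =====
def Claim_equal_tem123plus : Prop := ∀ (l : List Int), Dom_tem123plus l → Spec_tem123plus l (tem123plus l)

-- ===== LEMMAS AND PROOFS =====

theorem findFrom_eq (xs : List Int) (t : Int) (b : Nat) :
    findFrom xs t b = (xs.findIdx? (fun x => decide (x = t))).map (· + b) := by
  induction xs generalizing b with
  | nil => simp [findFrom]
  | cons x xs ih =>
    by_cases hx : x = t
    · simp [findFrom, hx, List.findIdx?_cons]
    · simp only [findFrom, ih, List.findIdx?_cons, decide_eq_true_eq, hx]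
      cases List.findIdx? (fun x => decide (x = t)) xs
      · simp
      · simp; omega

-- phase 2: once num_atual = 2, any later 3 sets resultado to the stored index
theorem loop_phase2 (xs : List Int) (pos r i : Int) (hi : i ≠ -1) :
    tem123plusLoop xs pos 2 r i =
      match xs.findIdx? (fun x => decide (x = 3)) with
      | none => r
      | some _ => i := by
  induction xs generalizing pos r with
  | nil => simp [tem123plusLoop]
  | cons x xs ih =>
    by_cases hx : x = 3
    · subst hx
      norm_num [tem123plusLoop, List.findIdx?_cons, hi, ih]
      cases xs.findIdx? (fun x => decide (x = 3)) <;> simp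
    · norm_num [tem123plusLoop, List.findIdx?_cons, hi, ih, hx]
      cases xs.findIdx? (fun x => decide (x = 3)) <;> simp

theorem loop_phase1 (xs : List Int) (pos i : Int) (hi : i ≠ -1) :
    tem123plusLoop xs pos 1 (-1) i =
      match xs.findIdx? (fun x => decide (x = 2)) with
      | none => -1
      | some k =>
        match (xs.drop (k + 1)).findIdx? (fun x => decide (x = 3)) with
        | none => -1
        | some _ => i := by
  induction xs generalizing pos with
  | nil => simp [tem123plusLoop]
  | cons x xs ih =>
    by_cases hx : x = 2
    · subst hx
      norm_num [tem123plusLoop, List.findIdx?_cons, hi, loop_phase2 xs (pos + 1) (-1) i hi]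
    · norm_num [tem123plusLoop, List.findIdx?_cons, hi, ih, hx]
      cases h2 : xs.findIdx? (fun x => decide (x = 2)) with
      | none => simp
      | some k => simp

theorem loop_phase0 (xs : List Int) (pos : Int) (hpos : 0 ≤ pos) :
    tem123plusLoop xs pos 0 (-1) (-1) =
      match xs.findIdx? (fun x => decide (x = 1)) with
      | none => -1
      | some i =>
        match (xs.drop (i + 1)).findIdx? (fun x => decide (x = 2)) with
        | none => -1
        | some k =>
          match ((xs.drop (i + 1)).drop (k + 1)).findIdx? (fun x => decide (x = 3)) with
          | none => -1
          | some _ => pos + i := by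
  induction xs generalizing pos with
  | nil => simp [tem123plusLoop]
  | cons x xs ih =>
    by_cases hx : x = 1
    · subst hx
      norm_num [tem123plusLoop, List.findIdx?_cons, loop_phase1 xs (pos + 1) pos (by omega)]
    · norm_num [tem123plusLoop, List.findIdx?_cons, hx, ih (pos + 1) (by omega)]
      cases h1 : xs.findIdx? (fun x => decide (x = 1)) with
      | none => simp
      | some i =>
        simp only [Option.map_some]
        cases h2 : (xs.drop (i + 1)).findIdx? (fun x => decide (x = 2)) with
        | none => simp
        | some k =>
          have harith : pos + 1 + (i : Int) = pos + ((i : Int) + 1) := by ring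
          rw [harith]
          simp only [Nat.cast_add, Nat.cast_one]

-- ===== VERDICT (by name: the statement is the Claim_ definition above) =====
theorem tem123plus_spec : Claim_equal_tem123plus := by
  intro l _
  unfold Spec_tem123plus tem123plus tem123plus_alt
  rw [loop_phase0 l 0 le_rfl]
  rw [findFrom_eq l 1 0]
  cases h1 : l.findIdx? (fun x => decide (x = 1)) with
  | none => simp
  | some i =>
    simp only [Option.map_some, Nat.add_zero]
    rw [findFrom_eq]
    cases h2 : (l.drop (i + 1)).findIdx? (fun x => decide (x = 2)) with
    | none => simp
    | some k =>
      simp only [Option.map_some]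
      rw [findFrom_eq]
      have hdrop : l.drop (k + (i + 1) + 1) = (l.drop (i + 1)).drop (k + 1) := by
        rw [List.drop_drop]; ring_nf
      rw [hdrop]
      cases ((l.drop (i + 1)).drop (k + 1)).findIdx? (fun x => decide (x = 3)) <;> simp
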